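-- pv_equiv track=rewrite | github.com/h2r/Task-Scoping | oo_scoping/domain_writers/minecraft_house_domainwriter_simple.py | make_types_declaration
-- ===== SOURCE A (Python) =====
-- from collections import OrderedDict
--
-- def invert_dict(d):
--     d_new = OrderedDict()
--     for k, v in d.items():
--         if v not in d_new.keys():
--             d_new[v] = []
--         d_new[v].append(k)
--     return d_new
--
-- def make_types_declaration(type_hierarchy):
--     inverse_type_hierarchy = invert_dict(type_hierarchy)
--     lines = []
--     for parent, children in inverse_type_hierarchy.items():
--         if parent is None:
--             pass
--             # from IPython import embed; embed()
--             # lines.extend(children)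
--         else:
--             l = " ".join(children) + " - " + parent
--             lines.append(l)
--     types_prefix = "(:types "
--     types_suffix = ")"
--     types_s = types_prefix + "\n\t" + "\n\t".join(lines) + "\n" + types_suffix
--     return types_s
-- ===== SOURCE B (Python) =====
-- def make_types_declaration(type_hierarchy):
--     parents = []
--     for v in type_hierarchy.values():
--         if v not in parents:
--             parents.append(v)
--     lines = []
--     for parent in parents:
--         if parent is None:
--             continue
--         children = [k for k, v in type_hierarchy.items() if v == parent]
--         lines.append(" ".join(children) + " - " + parent)
--     return "(:types " + "\n\t" + "\n\t".join(lines) + "\n" + ")"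
-- ===== Notes on version B (the rewrite author's own statement) =====
-- stated objective: simpler
-- what changed: Drops the invert_dict grouping index entirely: B first collects the distinct parent values in first-seen order, then gathers each non-None parent's children with a direct comprehension over the items, so no OrderedDict of lists is ever built.
import Mathlib
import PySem

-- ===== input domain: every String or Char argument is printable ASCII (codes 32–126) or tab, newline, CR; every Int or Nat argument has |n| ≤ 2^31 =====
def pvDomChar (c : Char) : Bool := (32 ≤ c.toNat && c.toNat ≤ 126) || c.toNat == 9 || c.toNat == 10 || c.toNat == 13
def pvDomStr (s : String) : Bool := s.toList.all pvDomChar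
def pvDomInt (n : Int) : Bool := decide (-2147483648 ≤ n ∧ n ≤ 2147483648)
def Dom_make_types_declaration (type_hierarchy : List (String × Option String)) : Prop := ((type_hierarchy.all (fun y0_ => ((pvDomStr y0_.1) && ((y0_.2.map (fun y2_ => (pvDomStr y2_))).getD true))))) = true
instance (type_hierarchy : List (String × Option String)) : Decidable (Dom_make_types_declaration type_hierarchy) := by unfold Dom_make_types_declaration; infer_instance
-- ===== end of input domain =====

-- B replaces A's invert_dict grouping index by a distinct-parents scan plus a per-parent
-- comprehension over the items (objective: simpler — no dict of lists is built).

-- ===== PORT A =====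
def invert_dict (d : List (String × Option String)) : PySem.Dict (Option String) (List String) :=
  d.foldl (fun dn kv =>
    let dn := if dn.contains kv.2 then dn else dn.insert kv.2 []
    dn.modify kv.2 [] (fun l => l ++ [kv.1])) PySem.Dict.empty

def make_types_declaration (type_hierarchy : List (String × Option String)) : String :=
  let inverse := invert_dict type_hierarchy
  let lines := inverse.items.foldl (fun lines pc =>
    match pc.1 with
    | none => lines
    | some parent => lines ++ [PySem.Str.join " " pc.2 ++ " - " ++ parent]) []
  "(:types " ++ "\n\t" ++ PySem.Str.join "\n\t" lines ++ "\n" ++ ")"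

-- ===== PORT B =====
def make_types_declaration_alt (type_hierarchy : List (String × Option String)) : String :=
  let parents := type_hierarchy.foldl
    (fun acc kv => if acc.contains kv.2 then acc else acc ++ [kv.2]) []
  let lines := parents.foldl (fun lines parent =>
    match parent with
    | none => lines
    | some p =>
        lines ++ [PySem.Str.join " "
          ((type_hierarchy.filter (fun kv => kv.2 == parent)).map (·.1)) ++ " - " ++ p]) []
  "(:types " ++ "\n\t" ++ PySem.Str.join "\n\t" lines ++ "\n" ++ ")"

-- ===== PRECONDITION & SPEC =====
def Spec_make_types_declaration (type_hierarchy : List (String × Option String)) (out : String) : Prop := out = make_types_declaration_alt type_hierarchy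
instance (type_hierarchy : List (String × Option String)) (out : String) : Decidable (Spec_make_types_declaration type_hierarchy out) := by unfold Spec_make_types_declaration; infer_instance

-- ===== CLAIM (what is proved, stated in full; the proofs are below) =====
def Claim_equal_make_types_declaration : Prop := ∀ (type_hierarchy : List (String × Option String)), Dom_make_types_declaration type_hierarchy → Spec_make_types_declaration type_hierarchy (make_types_declaration type_hierarchy)

-- ===== LEMMAS AND PROOFS =====

-- children of parent v, in key order
def pvKw (v : Option String) (l : List (String × Option String)) : List String :=
  (l.filter (fun kv => kv.2 == v)).map (·.1)

lemma pvKw_append (v : Option String) (l : List (String × Option String)) (x : String × Option String) :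
    pvKw v (l ++ [x]) = pvKw v l ++ (if x.2 == v then [x.1] else []) := by
  simp only [pvKw, List.filter_append, List.map_append]
  by_cases h : x.2 == v <;> simp [List.filter, h]

-- the invert_dict index lists each distinct parent (first-seen order) with its children
lemma invert_dict_items (l : List (String × Option String)) :
    (invert_dict l).items
      = (PySem.Set.ofList (l.map (·.2))).map (fun v => (v, pvKw v l)) := by
  induction l using List.reverseRecOn with
  | nil => rfl
  | append_singleton l x ih =>
    have hkeys : (invert_dict l).keys = PySem.Set.ofList (l.map (·.2)) := by
      show (invert_dict l).items.map (·.1) = _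
      rw [ih, List.map_map]; simp [Function.comp_def]
    have hnd : (invert_dict l).keys.Nodup := by
      rw [hkeys]; exact PySem.Set.nodup_ofList _
    have hcont : (invert_dict l).contains x.2 = decide (x.2 ∈ l.map (·.2)) := by
      rw [PySem.Dict.contains_eq_decide_mem_keys, hkeys, decide_eq_decide]
      exact PySem.Set.mem_ofList _ _
    have hofl : PySem.Set.ofList ((l ++ [x]).map (·.2))
        = PySem.Set.add (PySem.Set.ofList (l.map (·.2))) x.2 := by
      simp [PySem.Set.ofList_eq_foldl, List.map_append]
    unfold invert_dict
    rw [List.foldl_append]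
    show (let dn := if (invert_dict l).contains x.2 then invert_dict l
                    else (invert_dict l).insert x.2 [];
          dn.modify x.2 [] (fun c => c ++ [x.1])).items = _
    by_cases hmem : x.2 ∈ l.map (·.2)
    · have hc : (invert_dict l).contains x.2 = true := by
        rw [hcont]; simpa [PySem.Set.contains_iff] using (PySem.Set.mem_ofList _ _).mpr hmem
      have hget : (invert_dict l).getD x.2 [] = pvKw x.2 l :=
        PySem.Dict.getD_of_mem_items (invert_dict l)
          (by rw [ih]; exact List.mem_map.mpr ⟨x.2, (PySem.Set.mem_ofList _ _).mpr hmem, rfl⟩) hnd []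
      rw [hofl, PySem.Set.add]
      simp only [hc, if_pos]
      show ((invert_dict l).insert x.2 ((invert_dict l).getD x.2 [] ++ [x.1])).items = _
      rw [PySem.Dict.items_insert, if_pos hc, ih, hget, List.map_map,
        if_pos (by simpa [PySem.Set.contains_iff] using (PySem.Set.mem_ofList _ _).mpr hmem)]
      apply List.map_congr_left
      intro v _
      by_cases hv : v = x.2
      · subst hv; simp [pvKw_append]
      · have h1 : (x.2 == v) = false := beq_eq_false_iff_ne.mpr (fun h => hv h.symm)
        have h2 : (v == x.2) = false := beq_eq_false_iff_ne.mpr hv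
        simp [pvKw_append, h1, hv]
    · have hc : (invert_dict l).contains x.2 = false := by
        rw [hcont]
        simpa [PySem.Set.contains_iff, PySem.Set.mem_ofList] using hmem
      rw [hofl, PySem.Set.add]
      simp only [hc, if_neg, Bool.false_eq_true, not_false_iff]
      show (((invert_dict l).insert x.2 []).insert x.2
              ((((invert_dict l).insert x.2 []).getD x.2 []) ++ [x.1])).items = _
      rw [PySem.Dict.insert_insert_self, PySem.Dict.getD_insert_self,
        PySem.Dict.items_insert, if_neg (by simp [hc]), ih,
        if_neg (by simpa [PySem.Set.contains_iff, PySem.Set.mem_ofList] using hmem),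
        List.map_append]
      congr 1
      · apply List.map_congr_left
        intro v hv
        have hne : (x.2 == v) = false := by
          have : v ≠ x.2 := fun h => hmem (h ▸ (PySem.Set.mem_ofList _ _).mp hv)
          simpa using fun h => this h.symm
        simp [pvKw_append, hne]
      · have : pvKw x.2 l = [] := by
          simp only [pvKw, List.map_eq_nil_iff, List.filter_eq_nil_iff]
          intro kv hkv hb
          exact hmem (List.mem_map.mpr ⟨kv, hkv, eq_of_beq hb⟩)
        simp [pvKw_append, this]

lemma parents_eq (l : List (String × Option String)) :
    l.foldl (fun acc kv => if acc.contains kv.2 then acc else acc ++ [kv.2]) []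
      = PySem.Set.ofList (l.map (·.2)) := by
  rw [PySem.Set.ofList_eq_foldl, List.foldl_map]
  rfl

-- ===== VERDICT (by name: the statement is the Claim_ definition above) =====
theorem make_types_declaration_spec : Claim_equal_make_types_declaration := by
  intro th _
  show make_types_declaration th = make_types_declaration_alt th
  unfold make_types_declaration make_types_declaration_alt
  simp only [invert_dict_items, parents_eq, List.foldl_map, pvKw]
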